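-- pv_equiv track=rewrite | github.com/azzy13/selectivetracking | evaluation/worker.py | _match_color
-- ===== SOURCE A (Python) =====
-- def _match_color(detected_color: str, target_color: str) -> bool:
--     """
--     Check if detected color matches target color from prompt.
--     Handles synonyms and related colors.
--     """
--     detected_color = detected_color.lower()
--     target_color = target_color.lower()
--
--     # Direct match
--     if detected_color == target_color:
--         return True
--
--     # Handle synonyms and related colors
--     color_groups = {
--         'dark': ['dark', 'black'],  # "dark" now primary (brightness-based)
--         'light': ['light', 'white'],  # "light" now primary (brightness-based)
--         'gray': ['gray', 'grey', 'silver'],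
--         'red': ['red'],
--         'orange': ['orange'],
--         'yellow': ['yellow'],
--         'green': ['green'],
--         'blue': ['blue']
--     }
--
--     # Check if both colors are in the same group
--     for group_colors in color_groups.values():
--         if detected_color in group_colors and target_color in group_colors:
--             return True
--
--     return False
-- ===== SOURCE B (Python) =====
-- _COLOR_INDEX = {
--     'dark': 'dark', 'black': 'dark',
--     'light': 'light', 'white': 'light',
--     'gray': 'gray', 'grey': 'gray', 'silver': 'gray',
--     'red': 'red', 'orange': 'orange', 'yellow': 'yellow',
--     'green': 'green', 'blue': 'blue',
-- }
--
--
-- def _match_color(detected_color: str, target_color: str) -> bool: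
--     detected_color = detected_color.lower()
--     target_color = target_color.lower()
--     if detected_color == target_color:
--         return True
--     group = _COLOR_INDEX.get(detected_color)
--     return group is not None and group == _COLOR_INDEX.get(target_color)
-- ===== Notes on version B (the rewrite author's own statement) =====
-- stated objective: simpler
-- what changed: Replaced A's loop scanning every synonym group and testing dual membership with a prebuilt synonym-to-group inverted index: after the direct-equality guard, B just looks both lowercased names up and compares the group keys.
import Mathlib
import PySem

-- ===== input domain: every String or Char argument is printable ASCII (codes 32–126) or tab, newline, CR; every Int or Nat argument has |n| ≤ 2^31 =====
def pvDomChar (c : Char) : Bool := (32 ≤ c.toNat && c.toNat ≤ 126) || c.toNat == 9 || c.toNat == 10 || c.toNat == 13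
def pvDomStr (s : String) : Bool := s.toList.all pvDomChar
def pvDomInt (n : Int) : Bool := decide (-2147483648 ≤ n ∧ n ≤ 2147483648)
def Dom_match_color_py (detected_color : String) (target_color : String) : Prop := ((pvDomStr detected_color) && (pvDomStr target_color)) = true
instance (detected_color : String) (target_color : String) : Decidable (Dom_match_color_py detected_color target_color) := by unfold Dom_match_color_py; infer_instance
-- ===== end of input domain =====

-- B replaces A's scan over synonym groups by a prebuilt synonym→group index and two lookups (objective: simpler).

-- ===== PORT A =====
-- the for-loop over color_groups.values() with early return
def matchColorLoop (d t : String) : List (List String) → Bool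
  | [] => false
  | g :: rest => if g.contains d && g.contains t then true else matchColorLoop d t rest

def match_color_py (detected_color : String) (target_color : String) : Bool :=
  let d := PySem.Str.lower detected_color
  let t := PySem.Str.lower target_color
  if d == t then true
  else
    let color_groups : PySem.Dict String (List String) := PySem.Dict.ofList
      [("dark", ["dark", "black"]), ("light", ["light", "white"]),
       ("gray", ["gray", "grey", "silver"]), ("red", ["red"]),
       ("orange", ["orange"]), ("yellow", ["yellow"]),
       ("green", ["green"]), ("blue", ["blue"])]
    matchColorLoop d t (PySem.Dict.values color_groups)

-- ===== PORT B =====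
def colorIndex : PySem.Dict String String := PySem.Dict.ofList
  [("dark", "dark"), ("black", "dark"),
   ("light", "light"), ("white", "light"),
   ("gray", "gray"), ("grey", "gray"), ("silver", "gray"),
   ("red", "red"), ("orange", "orange"), ("yellow", "yellow"),
   ("green", "green"), ("blue", "blue")]

def match_color_py_alt (detected_color : String) (target_color : String) : Bool :=
  let d := PySem.Str.lower detected_color
  let t := PySem.Str.lower target_color
  if d == t then true
  else
    match PySem.Dict.get? colorIndex d with
    | none => false
    | some g => PySem.Dict.get? colorIndex t == some g

-- ===== PRECONDITION & SPEC =====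
def Spec_match_color_py (detected_color : String) (target_color : String) (out : Bool) : Prop := out = match_color_py_alt detected_color target_color
instance (detected_color : String) (target_color : String) (out : Bool) : Decidable (Spec_match_color_py detected_color target_color out) := by unfold Spec_match_color_py; infer_instance

-- ===== CLAIM (what is proved, stated in full; the proofs are below) =====
def Claim_equal_match_color_py : Prop := ∀ (detected_color : String) (target_color : String), Dom_match_color_py detected_color target_color → Spec_match_color_py detected_color target_color (match_color_py detected_color target_color)

-- ===== LEMMAS AND PROOFS =====
set_option maxHeartbeats 2000000 in
lemma loop_eq_lookup (d t : String) :
    matchColorLoop d t (PySem.Dict.values (PySem.Dict.ofList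
      [("dark", ["dark", "black"]), ("light", ["light", "white"]),
       ("gray", ["gray", "grey", "silver"]), ("red", ["red"]),
       ("orange", ["orange"]), ("yellow", ["yellow"]),
       ("green", ["green"]), ("blue", ["blue"])])) =
    (match PySem.Dict.get? colorIndex d with
     | none => false
     | some g => PySem.Dict.get? colorIndex t == some g) := by
  have hv : PySem.Dict.values (PySem.Dict.ofList
      ([("dark", ["dark", "black"]), ("light", ["light", "white"]),
       ("gray", ["gray", "grey", "silver"]), ("red", ["red"]),
       ("orange", ["orange"]), ("yellow", ["yellow"]),
       ("green", ["green"]), ("blue", ["blue"])] : List (String × List String))) =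
      [["dark", "black"], ["light", "white"], ["gray", "grey", "silver"],
       ["red"], ["orange"], ["yellow"], ["green"], ["blue"]] := by rfl
  have hi : colorIndex.items =
      [("dark", "dark"), ("black", "dark"), ("light", "light"), ("white", "light"),
       ("gray", "gray"), ("grey", "gray"), ("silver", "gray"), ("red", "red"),
       ("orange", "orange"), ("yellow", "yellow"), ("green", "green"), ("blue", "blue")] := by rfl
  rw [hv]
  by_cases h0 : d = "dark"
  · subst h0
    simp only [matchColorLoop, PySem.Dict.get?, hi, List.find?, List.contains_cons,
      List.contains_nil]
    clear hv hi
    repeat' split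
    all_goals simp_all [@eq_comm String]
  by_cases h1 : d = "black"
  · subst h1
    simp only [matchColorLoop, PySem.Dict.get?, hi, List.find?, List.contains_cons,
      List.contains_nil]
    clear hv hi
    repeat' split
    all_goals simp_all [@eq_comm String]
  by_cases h2 : d = "light"
  · subst h2
    simp only [matchColorLoop, PySem.Dict.get?, hi, List.find?, List.contains_cons,
      List.contains_nil]
    clear hv hi
    repeat' split
    all_goals simp_all [@eq_comm String]
  by_cases h3 : d = "white"
  · subst h3
    simp only [matchColorLoop, PySem.Dict.get?, hi, List.find?, List.contains_cons,
      List.contains_nil]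
    clear hv hi
    repeat' split
    all_goals simp_all [@eq_comm String]
  by_cases h4 : d = "gray"
  · subst h4
    simp only [matchColorLoop, PySem.Dict.get?, hi, List.find?, List.contains_cons,
      List.contains_nil]
    clear hv hi
    repeat' split
    all_goals simp_all [@eq_comm String]
  by_cases h5 : d = "grey"
  · subst h5
    simp only [matchColorLoop, PySem.Dict.get?, hi, List.find?, List.contains_cons,
      List.contains_nil]
    clear hv hi
    repeat' split
    all_goals simp_all [@eq_comm String]
  by_cases h6 : d = "silver"
  · subst h6
    simp only [matchColorLoop, PySem.Dict.get?, hi, List.find?, List.contains_cons,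
      List.contains_nil]
    clear hv hi
    repeat' split
    all_goals simp_all [@eq_comm String]
  by_cases h7 : d = "red"
  · subst h7
    simp only [matchColorLoop, PySem.Dict.get?, hi, List.find?, List.contains_cons,
      List.contains_nil]
    clear hv hi
    repeat' split
    all_goals simp_all [@eq_comm String]
  by_cases h8 : d = "orange"
  · subst h8
    simp only [matchColorLoop, PySem.Dict.get?, hi, List.find?, List.contains_cons,
      List.contains_nil]
    clear hv hi
    repeat' split
    all_goals simp_all [@eq_comm String]
  by_cases h9 : d = "yellow"
  · subst h9
    simp only [matchColorLoop, PySem.Dict.get?, hi, List.find?, List.contains_cons,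
      List.contains_nil]
    clear hv hi
    repeat' split
    all_goals simp_all [@eq_comm String]
  by_cases h10 : d = "green"
  · subst h10
    simp only [matchColorLoop, PySem.Dict.get?, hi, List.find?, List.contains_cons,
      List.contains_nil]
    clear hv hi
    repeat' split
    all_goals simp_all [@eq_comm String]
  by_cases h11 : d = "blue"
  · subst h11
    simp only [matchColorLoop, PySem.Dict.get?, hi, List.find?, List.contains_cons,
      List.contains_nil]
    clear hv hi
    repeat' split
    all_goals simp_all [@eq_comm String]
  · -- d matches no synonym
    have e0 : ("dark" == d) = false := beq_eq_false_iff_ne.mpr (fun h => h0 h.symm)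
    have e1 : ("black" == d) = false := beq_eq_false_iff_ne.mpr (fun h => h1 h.symm)
    have e2 : ("light" == d) = false := beq_eq_false_iff_ne.mpr (fun h => h2 h.symm)
    have e3 : ("white" == d) = false := beq_eq_false_iff_ne.mpr (fun h => h3 h.symm)
    have e4 : ("gray" == d) = false := beq_eq_false_iff_ne.mpr (fun h => h4 h.symm)
    have e5 : ("grey" == d) = false := beq_eq_false_iff_ne.mpr (fun h => h5 h.symm)
    have e6 : ("silver" == d) = false := beq_eq_false_iff_ne.mpr (fun h => h6 h.symm)
    have e7 : ("red" == d) = false := beq_eq_false_iff_ne.mpr (fun h => h7 h.symm)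
    have e8 : ("orange" == d) = false := beq_eq_false_iff_ne.mpr (fun h => h8 h.symm)
    have e9 : ("yellow" == d) = false := beq_eq_false_iff_ne.mpr (fun h => h9 h.symm)
    have e10 : ("green" == d) = false := beq_eq_false_iff_ne.mpr (fun h => h10 h.symm)
    have e11 : ("blue" == d) = false := beq_eq_false_iff_ne.mpr (fun h => h11 h.symm)
    simp only [matchColorLoop, PySem.Dict.get?, hi, List.find?, List.contains_cons,
      List.contains_nil, e0, e1, e2, e3, e4, e5, e6, e7, e8, e9, e10, e11]
    clear hv hi
    repeat' split
    all_goals simp_all [@eq_comm String]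

-- ===== VERDICT (by name: the statement is the Claim_ definition above) =====
theorem match_color_py_spec : Claim_equal_match_color_py := by
  intro dc tc _
  unfold Spec_match_color_py match_color_py match_color_py_alt
  simp only []
  split_ifs with h
  · rfl
  · exact loop_eq_lookup _ _
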